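-- pv_equiv track=rewrite | github.com/mrdavtan/YT_Transcribe | yt_transcribe/transcribe_video.py | text_to_paragraphs
-- ===== SOURCE A (Python) =====
-- def text_to_paragraphs(text, max_sentences_per_paragraph=10, max_paragraph_length=300):
--     sentence_delimiters = [".", "!", "?"]
--     sentences = []
--     current_sentence = ""
--     paragraphs = []
--     current_paragraph = ""
--     paragraph_length = 0
--
--     for char in text:
--         current_sentence += char
--         if char in sentence_delimiters:
--             sentences.append(current_sentence)
--             current_sentence = ""
--
--     if current_sentence:
--         sentences.append(current_sentence)
--
--     for sentence in sentences:
--         sentence = sentence.strip()  # Remove leading/trailing whitespace and newlines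
--         if sentence:
--             if current_paragraph:
--                 if (paragraph_length + len(sentence) + 1 <= max_paragraph_length) and (
--                     len(current_paragraph.split(".")) < max_sentences_per_paragraph
--                 ):
--                     current_paragraph += " "  # Add space between sentences
--                     current_paragraph += sentence
--                     paragraph_length += len(sentence) + 1  # +1 for the space
--                 else:
--                     paragraphs.append(current_paragraph)
--                     current_paragraph = sentence
--                     paragraph_length = len(sentence)
--             else:
--                 current_paragraph = sentence
--                 paragraph_length = len(sentence)
--
--     if current_paragraph:
--         paragraphs.append(current_paragraph)
--
--     return paragraphs
-- ===== SOURCE B (Python) =====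
-- def text_to_paragraphs(text, max_sentences_per_paragraph=10, max_paragraph_length=300):
--     # Index-based: cut points at delimiter positions give sentence slices; a
--     # two-phase grouping over the stripped sentence list collects each
--     # paragraph's sentences and joins them once, with running length/dot
--     # counters instead of a growing paragraph string that is re-split.
--     cuts = [i + 1 for i, ch in enumerate(text) if ch in ".!?"]
--     chunks = [text[a:b] for a, b in zip([0] + cuts, cuts + [len(text)])]
--     sents = [s for s in (c.strip() for c in chunks) if s]
--
--     paragraphs = []
--     while sents:
--         first, rest = sents[0], sents[1:]
--         sel = [first]
--         length = len(first)
--         dots = first.count(".")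
--         while rest and length + len(rest[0]) + 1 <= max_paragraph_length and dots + 1 < max_sentences_per_paragraph:
--             s = rest[0]
--             sel.append(s)
--             length += len(s) + 1
--             dots += s.count(".")
--             rest = rest[1:]
--         paragraphs.append(" ".join(sel))
--         sents = rest
--     return paragraphs
-- ===== Notes on version B (the rewrite author's own statement) =====
-- stated objective: alternative
-- what changed: Replaces A's character-accumulating split by index slicing at delimiter cut positions (enumerate + zip of cut points) and replaces A's growing current_paragraph string, which is re-split on every append to count its sentences, by a grouping loop that collects each paragraph's sentences in a list with running length and sentence-separator counters and joins them once per paragraph.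
import Mathlib
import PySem

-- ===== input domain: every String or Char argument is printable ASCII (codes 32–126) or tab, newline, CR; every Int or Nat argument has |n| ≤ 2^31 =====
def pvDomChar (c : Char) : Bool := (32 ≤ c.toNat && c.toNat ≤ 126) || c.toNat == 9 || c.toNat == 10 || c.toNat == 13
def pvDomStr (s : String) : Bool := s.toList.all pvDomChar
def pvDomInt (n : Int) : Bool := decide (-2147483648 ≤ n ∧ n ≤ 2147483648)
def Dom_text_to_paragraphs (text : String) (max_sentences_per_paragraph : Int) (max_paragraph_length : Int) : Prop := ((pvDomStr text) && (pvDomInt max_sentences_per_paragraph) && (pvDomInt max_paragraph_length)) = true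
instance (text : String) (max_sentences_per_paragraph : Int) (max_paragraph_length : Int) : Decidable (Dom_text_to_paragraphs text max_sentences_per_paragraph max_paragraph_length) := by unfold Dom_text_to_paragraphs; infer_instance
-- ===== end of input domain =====

-- B replaces A's character-accumulating split by index slicing at delimiter cut points
-- and A's growing re-split paragraph string by per-paragraph sentence lists with running
-- length and separator counters, joined once per paragraph (objective: alternative).


-- ===== PORT A =====
-- first loop of A: split into delimiter-retaining sentence chunks
def tpA_split (st : List (List Char) × List Char) (c : Char) : List (List Char) × List Char :=
  if c = '.' ∨ c = '!' ∨ c = '?' then (st.1 ++ [st.2 ++ [c]], []) else (st.1, st.2 ++ [c])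

-- second loop of A: body of 'for sentence in sentences' over (paragraphs, current_paragraph, paragraph_length)
def tpA_pstep (m L : Int) (st : List (List Char) × List Char × Int) (sentence : List Char) :
    List (List Char) × List Char × Int :=
  let s := PySem.Chars.strip sentence
  if s = [] then st
  else if st.2.1 ≠ [] then
    if st.2.2 + (s.length : Int) + 1 ≤ L ∧ ((PySem.Chars.splitOn st.2.1 ['.']).length : Int) < m then
      (st.1, st.2.1 ++ ' ' :: s, st.2.2 + (s.length : Int) + 1)
    else (st.1 ++ [st.2.1], s, (s.length : Int))
  else (st.1, s, (s.length : Int))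

def text_to_paragraphs (text : String) (max_sentences_per_paragraph : Int) (max_paragraph_length : Int) : List String :=
  let sp := text.toList.foldl tpA_split ([], [])
  let sentences := if sp.2 = [] then sp.1 else sp.1 ++ [sp.2]
  let fin := sentences.foldl (tpA_pstep max_sentences_per_paragraph max_paragraph_length) ([], [], 0)
  (if fin.2.1 = [] then fin.1 else fin.1 ++ [fin.2.1]).map (fun cs => String.ofList cs)

-- ===== PORT B =====
-- Source B's inner while loop: extend the current paragraph's sentence list while it fits
def tpB_take (m L : Int) (sel : List (List Char)) (length : Int) (dots : Nat) :
    List (List Char) → List (List Char) × List (List Char)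
  | [] => (sel, [])
  | s :: rest =>
    if length + (s.length : Int) + 1 ≤ L ∧ (dots : Int) + 1 < m then
      tpB_take m L (sel ++ [s]) (length + (s.length : Int) + 1)
        (dots + PySem.Chars.count s ['.']) rest
    else (sel, s :: rest)

-- the remaining sentences never grow (termination of the outer loop)
theorem tpB_take_snd_le (m L : Int) :
    ∀ (rest : List (List Char)) (sel : List (List Char)) (length : Int) (dots : Nat),
      (tpB_take m L sel length dots rest).2.length ≤ rest.length := by
  intro rest
  induction rest with
  | nil => intro sel length dots; simp [tpB_take]
  | cons s r ih =>
    intro sel length dots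
    simp only [tpB_take]
    split
    · exact le_trans (ih _ _ _) (by simp)
    · simp

-- Source B's outer while loop over the sentence list
def tpB_group (m L : Int) : List (List Char) → List (List Char)
  | [] => []
  | first :: rest =>
    let pr := tpB_take m L [first] (first.length : Int) (PySem.Chars.count first ['.']) rest
    PySem.Chars.join [' '] pr.1 :: tpB_group m L pr.2
termination_by sents => sents.length
decreasing_by
  exact Nat.lt_succ_of_le (tpB_take_snd_le m L rest [first] (first.length : Int) (PySem.Chars.count first ['.']))

def text_to_paragraphs_alt (text : String) (max_sentences_per_paragraph : Int) (max_paragraph_length : Int) : List String :=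
  let cuts := (PySem.List.enumerate text.toList).filterMap
    (fun p => if p.2 = '.' ∨ p.2 = '!' ∨ p.2 = '?' then some (p.1 + 1) else none)
  let chunks := ((0 :: cuts).zip (cuts ++ [(text.toList.length : Int)])).map
    (fun ab => PySem.List.slice text.toList (some ab.1) (some ab.2))
  let sents := (chunks.map PySem.Chars.strip).filter (fun s => decide (s ≠ []))
  (tpB_group max_sentences_per_paragraph max_paragraph_length sents).map (fun cs => String.ofList cs)

-- ===== PRECONDITION & SPEC =====
def Spec_text_to_paragraphs (text : String) (max_sentences_per_paragraph : Int) (max_paragraph_length : Int) (out : List String) : Prop := out = text_to_paragraphs_alt text max_sentences_per_paragraph max_paragraph_length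
instance (text : String) (max_sentences_per_paragraph : Int) (max_paragraph_length : Int) (out : List String) : Decidable (Spec_text_to_paragraphs text max_sentences_per_paragraph max_paragraph_length out) := by unfold Spec_text_to_paragraphs; infer_instance

-- ===== CLAIM (what is proved, stated in full; the proofs are below) =====
def Claim_equal_text_to_paragraphs : Prop := ∀ (text : String) (max_sentences_per_paragraph : Int) (max_paragraph_length : Int), Dom_text_to_paragraphs text max_sentences_per_paragraph max_paragraph_length → Spec_text_to_paragraphs text max_sentences_per_paragraph max_paragraph_length (text_to_paragraphs text max_sentences_per_paragraph max_paragraph_length)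

-- ===== LEMMAS AND PROOFS =====

-- count.go with a single-character dot needle is List.count of the dot
theorem countgo_dot (l : List Char) : ∀ (fuel : Nat) (acc : Nat), l.length ≤ fuel →
    PySem.Chars.count.go ['.'] fuel l acc = acc + l.count '.' := by
  induction l with
  | nil => intro fuel acc _; cases fuel <;> simp [PySem.Chars.count.go]
  | cons c rest ih =>
    intro fuel acc h
    cases fuel with
    | zero => simp at h
    | succ f =>
      simp only [PySem.Chars.count.go]
      by_cases hc : c = '.'
      · subst hc
        rw [if_pos (by simp [List.isPrefixOf])]
        simp only [List.length_singleton, List.drop_succ_cons, List.drop_zero]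
        rw [ih f (acc + 1) (by simp at h; omega)]
        rw [List.count_cons_self]
        omega
      · rw [if_neg (by simp [List.isPrefixOf]; exact fun h => hc h.symm)]
        rw [ih f acc (by simp at h; omega)]
        simp [hc]

theorem count_dot (s : List Char) : PySem.Chars.count s ['.'] = s.count '.' := by
  simp only [PySem.Chars.count]
  rw [if_neg (by simp)]
  rw [countgo_dot s s.length 0 (le_refl _)]
  omega

-- splitOn.go with the dot needle produces acc.length + 1 + (dot count) pieces
theorem splitgo_dot (l : List Char) : ∀ (fuel : Nat) (cur : List Char) (acc : List (List Char)),
    l.length < fuel →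
    (PySem.Chars.splitOn.go ['.'] fuel l cur acc).length = acc.length + 1 + l.count '.' := by
  induction l with
  | nil => intro fuel cur acc h; cases fuel with
    | zero => omega
    | succ f => simp [PySem.Chars.splitOn.go]
  | cons c rest ih =>
    intro fuel cur acc h
    cases fuel with
    | zero => omega
    | succ f =>
      simp only [PySem.Chars.splitOn.go]
      by_cases hc : c = '.'
      · subst hc
        rw [if_pos (by simp [List.isPrefixOf])]
        simp only [List.length_singleton, List.drop_succ_cons, List.drop_zero]
        rw [ih f [] (cur.reverse :: acc) (by simp at h; omega)]
        rw [List.count_cons_self]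
        simp
        omega
      · rw [if_neg (by simp [List.isPrefixOf]; exact fun h => hc h.symm)]
        rw [ih f (c :: cur) acc (by simp at h; omega)]
        simp [hc]

theorem splitOn_dot_length (cp : List Char) :
    (PySem.Chars.splitOn cp ['.']).length = cp.count '.' + 1 := by
  simp only [PySem.Chars.splitOn]
  rw [splitgo_dot cp (cp.length + 1) [] [] (by omega)]
  simp [Nat.add_comm]

-- ---- chunk phase: both splits produce the same full partition FC ----

def mapFirst (f : List Char → List Char) : List (List Char) → List (List Char)
  | [] => []
  | x :: xs => f x :: xs

-- the full delimiter-retaining partition (trailing piece included, possibly empty)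
def FC : List Char → List (List Char)
  | [] => [[]]
  | c :: t => if c = '.' ∨ c = '!' ∨ c = '?' then [c] :: FC t else mapFirst (c :: ·) (FC t)

theorem mapFirst_nil_append (xs : List (List Char)) : mapFirst (fun x => [] ++ x) xs = xs := by
  cases xs <;> simp [mapFirst]

-- A's splitting loop computes FC (buffer generalized)
theorem A_chunks (l : List Char) : ∀ (acc : List (List Char)) (buf : List Char),
    (l.foldl tpA_split (acc, buf)).1 ++ [(l.foldl tpA_split (acc, buf)).2]
      = acc ++ mapFirst (fun x => buf ++ x) (FC l) := by
  induction l with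
  | nil => intro acc buf; simp [FC, mapFirst]
  | cons c t ih =>
    intro acc buf
    simp only [List.foldl_cons, FC]
    by_cases hc : c = '.' ∨ c = '!' ∨ c = '?'
    · simp only [tpA_split, if_pos hc]
      rw [ih (acc ++ [buf ++ [c]]) [], mapFirst_nil_append]
      simp [mapFirst]
    · simp only [tpA_split, if_neg hc]
      rw [ih acc (buf ++ [c])]
      rcases hFC : FC t with _ | ⟨x, xs⟩
      · simp [mapFirst]
      · simp [mapFirst]

-- recursive form of B's delimiter cut positions
def cutsR : List Char → List Int
  | [] => []
  | c :: t => (if c = '.' ∨ c = '!' ∨ c = '?' then [(1 : Int)] else []) ++ (cutsR t).map (· + 1)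

theorem cuts_enum (l : List Char) : ∀ (s : Int),
    (PySem.List.enumerate l s).filterMap
      (fun p => if p.2 = '.' ∨ p.2 = '!' ∨ p.2 = '?' then some (p.1 + 1) else none)
      = (cutsR l).map (· + s) := by
  induction l with
  | nil => intro s; simp [cutsR, PySem.List.enumerate_nil]
  | cons c t ih =>
    intro s
    rw [PySem.List.enumerate_cons, List.filterMap_cons, cutsR]
    by_cases hc : c = '.' ∨ c = '!' ∨ c = '?'
    · simp only [if_pos hc, ih (s + 1), List.map_append, List.map_map]
      congr 1
      · simp [Int.add_comm]
      · apply List.map_congr_left; intro x _; simp; ring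
    · simp only [if_neg hc, ih (s + 1), List.nil_append]
      rw [List.map_map]
      apply List.map_congr_left; intro x _; simp only [Function.comp_apply]; ring

theorem cutsR_pos (l : List Char) : ∀ x ∈ cutsR l, 1 ≤ x := by
  induction l with
  | nil => simp [cutsR]
  | cons c t ih =>
    intro x hx
    simp only [cutsR, List.mem_append, List.mem_map] at hx
    rcases hx with hx | ⟨y, hy, rfl⟩
    · split at hx <;> simp_all
    · have := ih y hy; omega

-- the slice form of B's chunk list
def chunksOf (l : List Char) (cs : List Int) : List (List Char) :=
  ((0 :: cs).zip (cs ++ [(l.length : Int)])).map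
    (fun ab => PySem.List.slice l (some ab.1) (some ab.2))

theorem slice_cons_shift (c : Char) (t : List Char) (a b : Int) (ha : 0 ≤ a) (hb : 0 ≤ b) :
    PySem.List.slice (c :: t) (some (a + 1)) (some (b + 1)) = PySem.List.slice t (some a) (some b) := by
  rw [PySem.List.slice_toNat _ (by omega) (by omega), PySem.List.slice_toNat _ ha hb]
  rw [Int.toNat_add ha (by norm_num), Int.toNat_add hb (by norm_num)]
  simp

theorem slice_zero_take (l : List Char) (b : Int) (hb : 0 ≤ b) :
    PySem.List.slice l (some 0) (some b) = l.take b.toNat := by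
  rw [PySem.List.slice_toNat _ (by omega) hb]; simp

theorem FC_cutsR_nil : ∀ t : List Char, cutsR t = [] → FC t = [t] := by
  intro t
  induction t with
  | nil => intro _; rfl
  | cons d r ih =>
    intro h
    simp only [cutsR, List.append_eq_nil_iff, List.map_eq_nil_iff] at h
    obtain ⟨h1, h2⟩ := h
    have hd : ¬(d = '.' ∨ d = '!' ∨ d = '?') := by
      intro hd; rw [if_pos hd] at h1; simp at h1
    simp [FC, hd, ih h2, mapFirst]

-- shifting every cut by one prepends the new head character's cell
theorem map_slice_shift (c : Char) (t : List Char) (A B : List Int)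
    (hA : ∀ x ∈ A, 0 ≤ x) (hB : ∀ x ∈ B, 0 ≤ x) :
    ((A.map (· + 1)).zip (B.map (· + 1))).map
        (fun ab => PySem.List.slice (c :: t) (some ab.1) (some ab.2))
      = (A.zip B).map (fun ab => PySem.List.slice t (some ab.1) (some ab.2)) := by
  rw [List.zip_map, List.map_map]
  apply List.map_congr_left
  intro ab hab
  rcases ab with ⟨a, b⟩
  obtain ⟨h1, h2⟩ := List.of_mem_zip hab
  simp only [Function.comp_apply, Prod.map]
  exact slice_cons_shift c t a b (hA _ h1) (hB _ h2)

theorem chunks_eq_FC (l : List Char) : chunksOf l (cutsR l) = FC l := by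
  induction l with
  | nil => rfl
  | cons c t ih =>
    have hpos := cutsR_pos t
    have hn : ((c :: t).length : Int) = (t.length : Int) + 1 := by
      rw [List.length_cons]; push_cast; ring
    have hA : ∀ x ∈ (0 : Int) :: cutsR t, 0 ≤ x := by
      intro x hx; rcases List.mem_cons.mp hx with rfl | hx
      · rfl
      · have := hpos x hx; omega
    have hB : ∀ x ∈ cutsR t ++ [(t.length : Int)], 0 ≤ x := by
      intro x hx; rcases List.mem_append.mp hx with hx | hx
      · have := hpos x hx; omega
      · simp at hx; omega
    simp only [FC, cutsR]
    by_cases hc : c = '.' ∨ c = '!' ∨ c = '?'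
    · rw [if_pos hc, if_pos hc]
      simp only [chunksOf, List.singleton_append, hn]
      rw [List.cons_append, List.zip_cons_cons, List.map_cons]
      have hhead : PySem.List.slice (c :: t) (some 0) (some 1) = [c] := by
        rw [slice_zero_take _ _ (by norm_num)]
        norm_num
      rw [hhead]
      congr 1
      have e1 : (1 : Int) :: (cutsR t).map (· + 1) = ((0 : Int) :: cutsR t).map (· + 1) := by
        simp
      have e2 : (cutsR t).map (· + 1) ++ [(t.length : Int) + 1]
          = (cutsR t ++ [(t.length : Int)]).map (· + 1) := by simp
      rw [e1, e2, map_slice_shift c t _ _ hA hB]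
      simpa [chunksOf] using ih
    · rw [if_neg hc, if_neg hc]
      rcases hcs : cutsR t with _ | ⟨k, ks⟩
      · have hFt : FC t = [t] := FC_cutsR_nil t hcs
        simp only [chunksOf, List.map_nil, List.nil_append, hn, hFt, mapFirst]
        rw [show ([(0 : Int)].zip [(t.length : Int) + 1]) = [((0 : Int), (t.length : Int) + 1)] from rfl,
          List.map_singleton]
        rw [slice_zero_take _ _ (by omega)]
        have : ((t.length : Int) + 1).toNat = t.length + 1 := by omega
        rw [this, List.take_of_length_le (by simp)]
      · have hk : (1 : Int) ≤ k := hpos k (by rw [hcs]; exact List.mem_cons_self)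
        rw [hcs] at hA hB
        have hFt : FC t = PySem.List.slice t (some 0) (some k)
            :: ((k :: ks).zip (ks ++ [(t.length : Int)])).map
              (fun ab => PySem.List.slice t (some ab.1) (some ab.2)) := by
          rw [← ih, hcs]
          simp only [chunksOf]
          rw [List.cons_append, List.zip_cons_cons, List.map_cons]
        have hhead : PySem.List.slice (c :: t) (some 0) (some (k + 1))
            = c :: PySem.List.slice t (some 0) (some k) := by
          rw [slice_zero_take _ _ (by omega), slice_zero_take _ _ (by omega)]
          have : (k + 1).toNat = k.toNat + 1 := by omega
          rw [this, List.take_succ_cons]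
        simp only [chunksOf, hn, List.nil_append, List.map_cons]
        rw [List.cons_append, List.zip_cons_cons, List.map_cons, hhead]
        have e1 : (k + 1) :: (ks.map (· + 1)) = (k :: ks).map (· + 1) := by simp
        have e2 : ks.map (· + 1) ++ [(t.length : Int) + 1]
            = (ks ++ [(t.length : Int)]).map (· + 1) := by simp
        rw [e1, e2, map_slice_shift c t (k :: ks) (ks ++ [(t.length : Int)])
          (fun x hx => hA x (List.mem_cons_of_mem _ hx))
          (fun x hx => hB x (List.mem_cons_of_mem _ hx)), hFt, mapFirst]

-- ---- grouping phase ----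

-- A's paragraph step on an already-stripped sentence
def tpA_pstep2 (m L : Int) (st : List (List Char) × List Char × Int) (s : List Char) :
    List (List Char) × List Char × Int :=
  if st.2.1 ≠ [] then
    if st.2.2 + (s.length : Int) + 1 ≤ L ∧ ((PySem.Chars.splitOn st.2.1 ['.']).length : Int) < m then
      (st.1, st.2.1 ++ ' ' :: s, st.2.2 + (s.length : Int) + 1)
    else (st.1 ++ [st.2.1], s, (s.length : Int))
  else (st.1, s, (s.length : Int))

theorem pstep_eq (m L : Int) (st : List (List Char) × List Char × Int) (raw : List Char) :
    tpA_pstep m L st raw =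
      if PySem.Chars.strip raw ≠ [] then tpA_pstep2 m L st (PySem.Chars.strip raw) else st := by
  simp only [tpA_pstep, tpA_pstep2]
  by_cases h : PySem.Chars.strip raw = [] <;> simp [h]

theorem join_append_singleton (sel : List (List Char)) (s : List Char) (h : sel ≠ []) :
    PySem.Chars.join [' '] (sel ++ [s]) = PySem.Chars.join [' '] sel ++ ' ' :: s := by
  induction sel with
  | nil => simp at h
  | cons x rest ih =>
    cases rest with
    | nil => simp [PySem.Chars.join_singleton, PySem.Chars.join_cons_cons]
    | cons y r =>
      simp only [List.cons_append]
      rw [PySem.Chars.join_cons_cons, PySem.Chars.join_cons_cons, ← List.cons_append,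
        ih (by simp)]
      simp

-- main simulation: A's fold over the remaining sentences vs B's take/group recursion
theorem group_sim (m L : Int) : ∀ (sents : List (List Char)), (∀ s ∈ sents, s ≠ []) →
    ∀ (paras sel : List (List Char)), PySem.Chars.join [' '] sel ≠ [] →
    (let f := sents.foldl (tpA_pstep2 m L)
        (paras, PySem.Chars.join [' '] sel, ((PySem.Chars.join [' '] sel).length : Int));
      if f.2.1 = [] then f.1 else f.1 ++ [f.2.1])
    = paras ++
      (let pr := tpB_take m L sel ((PySem.Chars.join [' '] sel).length : Int)
        (PySem.Chars.count (PySem.Chars.join [' '] sel) ['.']) sents;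
      PySem.Chars.join [' '] pr.1 :: tpB_group m L pr.2) := by
  intro sents
  induction sents with
  | nil =>
    intro _ paras sel hsel
    simp only [List.foldl_nil, tpB_take]
    simp [hsel, tpB_group]
  | cons s rest ih =>
    intro hne paras sel hsel
    have hs : s ≠ [] := hne s List.mem_cons_self
    have hrest : ∀ x ∈ rest, x ≠ [] := fun x hx => hne x (List.mem_cons_of_mem _ hx)
    have hselne : sel ≠ [] := by
      intro h; rw [h] at hsel; exact hsel (PySem.Chars.join_nil _)
    have hjapp : PySem.Chars.join [' '] (sel ++ [s])
        = PySem.Chars.join [' '] sel ++ ' ' :: s := join_append_singleton sel s hselne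
    have hsp : ((PySem.Chars.splitOn (PySem.Chars.join [' '] sel) ['.']).length : Int)
        = (PySem.Chars.count (PySem.Chars.join [' '] sel) ['.'] : Int) + 1 := by
      rw [splitOn_dot_length, count_dot]; push_cast; ring
    simp only [List.foldl_cons, tpB_take, tpA_pstep2, ne_eq, hsel, not_false_iff, if_true, hsp]
    by_cases hcond : ((PySem.Chars.join [' '] sel).length : Int) + (s.length : Int) + 1 ≤ L ∧
        (PySem.Chars.count (PySem.Chars.join [' '] sel) ['.'] : Int) + 1 < m
    · rw [if_pos hcond, if_pos hcond]
      have hlen : ((PySem.Chars.join [' '] (sel ++ [s])).length : Int)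
          = ((PySem.Chars.join [' '] sel).length : Int) + (s.length : Int) + 1 := by
        rw [hjapp]; push_cast [List.length_append, List.length_cons]; ring
      have hcnt : PySem.Chars.count (PySem.Chars.join [' '] (sel ++ [s])) ['.']
          = PySem.Chars.count (PySem.Chars.join [' '] sel) ['.'] + PySem.Chars.count s ['.'] := by
        rw [hjapp, count_dot, count_dot, count_dot, List.count_append, List.count_cons]
        simp
      have hne2 : PySem.Chars.join [' '] (sel ++ [s]) ≠ [] := by
        rw [hjapp]; simp
      have := ih hrest paras (sel ++ [s]) hne2
      rw [hjapp] at this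
      rw [hjapp] at hlen hcnt
      rw [hlen, hcnt] at this
      exact this
    · rw [if_neg hcond, if_neg hcond]
      have hjs : PySem.Chars.join [' '] [s] = s := PySem.Chars.join_singleton [' '] s
      have hsne : PySem.Chars.join [' '] [s] ≠ [] := by rw [hjs]; exact hs
      have := ih hrest (paras ++ [PySem.Chars.join [' '] sel]) [s] hsne
      rw [hjs] at this
      rw [this]
      simp only [tpB_group]
      simp

theorem strip_nil : PySem.Chars.strip ([] : List Char) = [] := by decide

theorem pstep_nil (m L : Int) (st : List (List Char) × List Char × Int) :
    tpA_pstep m L st [] = st := by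
  simp [tpA_pstep, strip_nil]

-- A's sentence loop over raw chunks is the stripped-nonempty loop over a filtered list
theorem fold_pstep_filter (m L : Int) (chunks : List (List Char))
    (st : List (List Char) × List Char × Int) :
    chunks.foldl (tpA_pstep m L) st
      = ((chunks.map PySem.Chars.strip).filter (fun s => decide (s ≠ []))).foldl
          (tpA_pstep2 m L) st := by
  have h1 : chunks.foldl (tpA_pstep m L) st
      = (chunks.map PySem.Chars.strip).foldl
          (fun acc s => if s ≠ [] then tpA_pstep2 m L acc s else acc) st := by
    rw [List.foldl_map]
    apply PySem.List.foldl_congr_mem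
    intro acc x _
    exact pstep_eq m L acc x
  rw [h1, PySem.List.foldl_ite_eq_foldl_filter]

-- ===== VERDICT (by name: the statement is the Claim_ definition above) =====
theorem text_to_paragraphs_spec : Claim_equal_text_to_paragraphs := by
  intro text m L _
  show text_to_paragraphs text m L = text_to_paragraphs_alt text m L
  simp only [text_to_paragraphs, text_to_paragraphs_alt]
  rw [cuts_enum text.toList 0]
  have h0 : (cutsR text.toList).map (· + (0 : Int)) = cutsR text.toList := by simp
  rw [h0]
  have hchunks : ((0 :: cutsR text.toList).zip
        (cutsR text.toList ++ [(text.toList.length : Int)])).map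
        (fun ab => PySem.List.slice text.toList (some ab.1) (some ab.2))
      = FC text.toList := by
    simpa [chunksOf] using chunks_eq_FC text.toList
  rw [hchunks]
  have hfc : (text.toList.foldl tpA_split ([], [])).1
      ++ [(text.toList.foldl tpA_split ([], [])).2] = FC text.toList := by
    rw [A_chunks text.toList [] [], mapFirst_nil_append]
    simp
  have hS : (if (text.toList.foldl tpA_split ([], [])).2 = []
        then (text.toList.foldl tpA_split ([], [])).1
        else (text.toList.foldl tpA_split ([], [])).1
          ++ [(text.toList.foldl tpA_split ([], [])).2]).foldl (tpA_pstep m L) ([], [], 0)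
      = (FC text.toList).foldl (tpA_pstep m L) ([], [], 0) := by
    by_cases h2 : (text.toList.foldl tpA_split ([], [])).2 = []
    · rw [if_pos h2, ← hfc, h2, List.foldl_append]
      simp [pstep_nil]
    · rw [if_neg h2, hfc]
  rw [hS, fold_pstep_filter]
  have hne : ∀ x ∈ ((FC text.toList).map PySem.Chars.strip).filter (fun s => decide (s ≠ [])),
      x ≠ [] := by
    intro x hx
    have := (List.mem_filter.mp hx).2
    simpa using this
  rcases hsents : ((FC text.toList).map PySem.Chars.strip).filter (fun s => decide (s ≠ [])) with
    _ | ⟨s, rest⟩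
  · simp [tpB_group]
  · rw [hsents] at hne
    have hs : s ≠ [] := hne s List.mem_cons_self
    have hrest : ∀ x ∈ rest, x ≠ [] := fun x hx => hne x (List.mem_cons_of_mem _ hx)
    have hfirst : tpA_pstep2 m L ([], [], 0) s = ([], s, (s.length : Int)) := by
      simp [tpA_pstep2]
    rw [List.foldl_cons, hfirst]
    have hjs : PySem.Chars.join [' '] [s] = s := PySem.Chars.join_singleton [' '] s
    have := group_sim m L rest hrest [] [s] (by rw [hjs]; exact hs)
    rw [hjs] at this
    simp only [List.nil_append] at this
    rw [this]
    simp only [tpB_group]
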